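-- pv_equiv track=rewrite | github.com/ullumullu/adventofcode2020 | challenges/day6.py | unique_votes
-- ===== SOURCE A (Python) =====
-- from typing import List
--
-- def unique_votes(groups: List[List[str]]) -> int:
--     """Counts the sum of answers intersecting in a group.
--     """
--     votes = 0
--     for group in groups:
--         union_group = set(group[0])
--         for person in group:
--             union_group = union_group.intersection(person)
--         votes += len(union_group)
--     return votes
-- ===== SOURCE B (Python) =====
-- def unique_votes(groups):
--     """Counts the sum of answers intersecting in a group."""
--     total = 0
--     for group in groups:
--         n = len(group)
--         counts = {}
--         for person in group:
--             for ch in dict.fromkeys(person):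
--                 counts[ch] = counts.get(ch, 0) + 1
--         total += sum(1 for c in counts.values() if c == n)
--     return total
-- ===== Notes on version B (the rewrite author's own statement) =====
-- stated objective: alternative
-- what changed: Replaces the per-group chain of set intersections by a single counting table (dict of per-person distinct letters); a letter is common to the whole group iff its count equals the group size, so the answer is the number of table entries with count == len(group).
import Mathlib
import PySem

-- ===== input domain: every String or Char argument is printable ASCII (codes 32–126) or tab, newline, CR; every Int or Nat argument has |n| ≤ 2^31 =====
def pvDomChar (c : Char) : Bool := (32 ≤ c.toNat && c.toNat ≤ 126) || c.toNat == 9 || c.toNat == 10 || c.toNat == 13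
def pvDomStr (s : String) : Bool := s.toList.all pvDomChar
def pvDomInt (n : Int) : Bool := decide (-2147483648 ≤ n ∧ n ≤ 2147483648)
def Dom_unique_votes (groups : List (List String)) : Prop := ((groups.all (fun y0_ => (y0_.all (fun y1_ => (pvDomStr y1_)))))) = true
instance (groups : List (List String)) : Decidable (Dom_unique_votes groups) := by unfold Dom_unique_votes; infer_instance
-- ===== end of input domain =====

-- B replaces the per-group intersection chain by a letter-count table; alternative decomposition, same cost.
-- ===== PORT A =====
def unique_votes (groups : List (List String)) : Int :=
  groups.foldl (fun votes group =>
    match PySem.List.pyGet? group 0 with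
    | none => votes          -- group[0] raises IndexError here; excluded by Pre_
    | some g0 =>
      let u := group.foldl (fun u person => PySem.Set.inter u person.toList)
                 (PySem.Set.ofList g0.toList)
      votes + PySem.Set.len u) 0

-- ===== PORT B =====
def unique_votes_alt (groups : List (List String)) : Int :=
  groups.foldl (fun total group =>
    let n : Int := PySem.List.len group
    let counts : PySem.Dict Char Int :=
      group.foldl (fun d person =>
        (PySem.List.dedup person.toList).foldl
          (fun d ch => d.insert ch (d.getD ch 0 + 1)) d) PySem.Dict.empty
    total + ((counts.values.filter (fun c => c == n)).length : Int)) 0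

-- ===== PRECONDITION & SPEC =====
-- Pre_ excludes exactly the inputs containing an empty group, on which A raises IndexError at group[0].
def Pre_unique_votes (groups : List (List String)) : Prop := ∀ g ∈ groups, g ≠ []
instance (groups : List (List String)) : Decidable (Pre_unique_votes groups) := by
  unfold Pre_unique_votes; infer_instance
def pvWitness_unique_votes : List (List String) := [["ab", "b"], ["xy"]]

def Spec_unique_votes (groups : List (List String)) (out : Int) : Prop := out = unique_votes_alt groups
instance (groups : List (List String)) (out : Int) : Decidable (Spec_unique_votes groups out) := by
  unfold Spec_unique_votes; infer_instance

-- ===== CLAIM (what is proved, stated in full; the proofs are below) =====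
def Claim_equal_unique_votes : Prop := ∀ (groups : List (List String)), Dom_unique_votes groups → Pre_unique_votes groups → Spec_unique_votes groups (unique_votes groups)

-- ===== LEMMAS AND PROOFS =====

-- A's inner loop: the fold of intersections keeps exactly the elements of the start set lying in every person.
theorem foldl_inter_spec (ps : List String) (s : PySem.Set Char) (hs : s.Nodup) :
    (ps.foldl (fun u person => PySem.Set.inter u person.toList) s).Nodup ∧
    ∀ c, c ∈ ps.foldl (fun u person => PySem.Set.inter u person.toList) s ↔
      (c ∈ s ∧ ∀ p ∈ ps, c ∈ p.toList) := by
  induction ps generalizing s with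
  | nil => simp [hs]
  | cons p ps ih =>
    have h := ih (PySem.Set.inter s p.toList) (PySem.Set.nodup_inter _ _ hs)
    refine ⟨h.1, fun c => ?_⟩
    rw [List.foldl_cons, (h.2 c), PySem.Set.mem_inter]
    constructor
    · rintro ⟨⟨h1, h2⟩, h3⟩; exact ⟨h1, by simpa using ⟨h2, h3⟩⟩
    · rintro ⟨h1, h2⟩
      exact ⟨⟨h1, h2 p (by simp)⟩, fun q hq => h2 q (by simp [hq])⟩

-- B's inner double loop is Counter of the concatenation of the per-person distinct letters
theorem counts_eq_counter (group : List String) :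
    group.foldl (fun d person =>
        (PySem.List.dedup person.toList).foldl
          (fun d ch => d.insert ch (d.getD ch 0 + 1)) d) PySem.Dict.empty
      = PySem.Dict.counter (group.flatMap (fun p => PySem.List.dedup p.toList)) := by
  rw [← PySem.Dict.foldl_insert_getD_add_one_eq_counter, List.foldl_flatMap]

-- counting c in the concatenation of per-person distinct letters = number of persons containing c
theorem count_flatMap_dedup (group : List String) (c : Char) :
    (group.flatMap (fun p => PySem.List.dedup p.toList)).count c
      = group.countP (fun p => decide (c ∈ p.toList)) := by
  induction group with
  | nil => simp
  | cons p ps ih =>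
    rw [List.flatMap_cons, List.count_append, ih, List.countP_cons]
    by_cases h : c ∈ p.toList
    · rw [List.count_eq_one_of_mem (PySem.List.nodup_dedup _) (by simpa [PySem.List.mem_dedup])]
      simp [h, Nat.add_comm]
    · rw [List.count_eq_zero_of_not_mem (by simpa [PySem.List.mem_dedup])]
      simp [h]

-- per-group equality: |intersection of the group| = #{letters whose count equals the group size}
theorem pergroup (g0 : String) (rest : List String) :
    PySem.Set.len ((g0 :: rest).foldl (fun u person => PySem.Set.inter u person.toList)
        (PySem.Set.ofList g0.toList))
      = (((PySem.Dict.counter ((g0 :: rest).flatMap (fun p => PySem.List.dedup p.toList))).values.filter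
            (fun c => c == PySem.List.len (g0 :: rest))).length : Int) := by
  obtain ⟨hnd, hmem⟩ := foldl_inter_spec (g0 :: rest) (PySem.Set.ofList g0.toList)
    (PySem.Set.nodup_ofList _)
  rw [PySem.Dict.values_eq_map_keys _ (PySem.Dict.nodup_keys_counter _) 0, List.filter_map,
    List.length_map, PySem.Dict.keys_counter]
  simp only [PySem.Set.len, PySem.List.len_eq, Function.comp_def, PySem.Dict.getD_counter]
  congr 1
  apply List.Perm.length_eq
  rw [List.perm_ext_iff_of_nodup hnd (List.Nodup.filter _ (PySem.Set.nodup_ofList _))]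
  intro c
  rw [hmem c, List.mem_filter, PySem.Set.mem_ofList, PySem.Set.mem_ofList, List.mem_flatMap]
  have hcount : ((g0 :: rest).flatMap (fun p => PySem.List.dedup p.toList)).count c
      = (g0 :: rest).countP (fun p => decide (c ∈ p.toList)) := count_flatMap_dedup _ _
  constructor
  · rintro ⟨h0, hall⟩
    refine ⟨⟨g0, by simp, by simpa [PySem.List.mem_dedup] using h0⟩, ?_⟩
    have hlen : ((g0 :: rest).flatMap (fun p => PySem.List.dedup p.toList)).count c
        = (g0 :: rest).length :=
      hcount.trans (List.countP_eq_length.mpr (fun p hp => by simpa using hall p hp))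
    show ((((g0 :: rest).flatMap (fun p => PySem.List.dedup p.toList)).count c : Int)
        == ((g0 :: rest).length : Int)) = true
    exact beq_iff_eq.mpr (by exact_mod_cast hlen)
  · rintro ⟨-, hc⟩
    have hc2 : ((((g0 :: rest).flatMap (fun p => PySem.List.dedup p.toList)).count c : Int))
        = ((g0 :: rest).length : Int) := beq_iff_eq.mp (by simpa using hc)
    have hc' : ((g0 :: rest).flatMap (fun p => PySem.List.dedup p.toList)).count c
        = (g0 :: rest).length := by exact_mod_cast hc2
    have hall : ∀ p ∈ (g0 :: rest), c ∈ p.toList := by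
      have := List.countP_eq_length.mp (hcount ▸ hc')
      intro p hp; simpa using this p hp
    exact ⟨by simpa [PySem.List.mem_dedup] using hall g0 (by simp), hall⟩

-- ===== VERDICT (by name: the statement is the Claim_ definition above) =====
theorem unique_votes_spec : Claim_equal_unique_votes := by
  intro groups _ hpre
  unfold Spec_unique_votes unique_votes unique_votes_alt
  apply PySem.List.foldl_congr_mem
  intro acc g hg
  obtain ⟨g0, rest, rfl⟩ : ∃ g0 rest, g = g0 :: rest := by
    cases g with
    | nil => exact absurd rfl (hpre _ hg)
    | cons g0 rest => exact ⟨g0, rest, rfl⟩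
  simp only [show PySem.List.pyGet? (g0 :: rest) (0 : Int) = some g0 from by
    simp [PySem.List.pyGet?, PySem.List.pyIdx?], counts_eq_counter]
  rw [pergroup]
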